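-- pv_equiv track=rewrite | github.com/dozine/codetree-TILs | 250206/양수 직사각형의 최대 크기/max-area-of-positive-rectangle.py | max_positive_rectangle
-- ===== SOURCE A (Python) =====
-- def largest_rectangle_area(heights):
--     """히스토그램에서 가장 큰 직사각형의 넓이를 구하는 함수"""
--     stack = []
--     max_area = 0
--     heights.append(0)  # 끝을 표시하기 위한 더미 값 추가
--
--     for i, h in enumerate(heights):
--         while stack and heights[stack[-1]] > h:
--             height = heights[stack.pop()]
--             width = i if not stack else i - stack[-1] - 1
--             max_area = max(max_area, height * width)
--         stack.append(i)
--
--     heights.pop()  # 더미 값 제거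
--     return max_area
--
-- def max_positive_rectangle(grid):
--     n, m = len(grid), len(grid[0])
--     max_area = 0
--     heights = [0] * m  # 히스토그램 높이 배열 초기화
--
--     for i in range(n):
--         for j in range(m):
--             # 연속된 양수 높이 계산
--             if grid[i][j] > 0:
--                 heights[j] += 1
--             else:
--                 heights[j] = 0
--         # 현재 행의 히스토그램에서 최대 직사각형 넓이 계산
--         max_area = max(max_area, largest_rectangle_area(heights))
--
--     return max_area
-- ===== SOURCE B (Python) =====
-- def max_positive_rectangle(grid):
--     # Per-row histogram of consecutive positive counts (as in any solution),
--     # but the best rectangle of each row is found by direct nearest-smaller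
--     # boundary scans per column instead of a monotonic stack.
--     # Tie rule: the right scan runs over equal heights (>=), the left scan stops
--     # at them (<=), so each maximal rectangle is counted once, at the leftmost
--     # column of minimal height.
--     n, m = len(grid), len(grid[0])
--     heights = [0] * m
--     best = 0
--     for i in range(n):
--         row = grid[i]
--         for j in range(m):
--             heights[j] = heights[j] + 1 if row[j] > 0 else 0
--         for j in range(m):
--             h = heights[j]
--             l = j - 1
--             while l >= 0 and heights[l] > h:
--                 l -= 1
--             r = j + 1
--             while r < m and heights[r] >= h:
--                 r += 1
--             area = h * (r - l - 1)
--             if area > best: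
--                 best = area
--     return best
-- ===== Notes on version B (the rewrite author's own statement) =====
-- stated objective: alternative
-- what changed: Per-row histogram kept, but the best rectangle of each row is found by direct left/right nearest-smaller boundary scans per column (asymmetric <=/< tie rule) instead of a monotonic stack over the histogram.
import Mathlib
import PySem

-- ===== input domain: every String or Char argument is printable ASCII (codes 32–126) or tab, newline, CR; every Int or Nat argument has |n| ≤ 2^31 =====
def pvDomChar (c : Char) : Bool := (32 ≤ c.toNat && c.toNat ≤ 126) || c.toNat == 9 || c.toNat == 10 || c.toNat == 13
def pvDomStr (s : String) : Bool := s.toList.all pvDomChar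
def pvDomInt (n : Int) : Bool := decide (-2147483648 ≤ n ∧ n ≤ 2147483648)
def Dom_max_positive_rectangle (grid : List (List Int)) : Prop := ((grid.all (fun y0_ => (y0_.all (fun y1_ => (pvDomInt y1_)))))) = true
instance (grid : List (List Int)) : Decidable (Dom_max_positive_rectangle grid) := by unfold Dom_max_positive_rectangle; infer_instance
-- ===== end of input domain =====

-- B replaces A's monotonic-stack histogram scan by per-column nearest-smaller boundary
-- scans (alternative decomposition, not claimed faster); return-value equivalence only
-- (A temporarily appends/pops a sentinel on its argument, restoring it).

-- ===== PORT A =====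
-- inner 'while stack and heights[stack[-1]] > h: …' of largest_rectangle_area
def pvPopLoop (H : List Int) (i : Nat) (h : Int) : List Nat → Int → List Nat × Int
  | [], ma => ([], ma)
  | p :: rest, ma =>
    if H.getD p 0 > h then
      let width : Int := match rest with
        | [] => (i : Int)
        | q :: _ => (i : Int) - (q : Int) - 1
      pvPopLoop H i h rest (max ma (H.getD p 0 * width))
    else (p :: rest, ma)

def largest_rectangle_area (heights : List Int) : Int :=
  let H := heights ++ [0]          -- heights.append(0) … heights.pop(): net effect on the return value only
  ((List.range H.length).foldl (fun st i =>
      let r := pvPopLoop H i (H.getD i 0) st.1 st.2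
      (i :: r.1, r.2)) ([], 0)).2

def max_positive_rectangle (grid : List (List Int)) : Int :=
  let m := (grid.getD 0 []).length
  (grid.foldl (fun (st : List Int × Int) row =>
      let heights := (List.range m).map (fun j => if row.getD j 0 > 0 then st.1.getD j 0 + 1 else 0)
      (heights, max st.2 (largest_rectangle_area heights)))
    (List.replicate m 0, 0)).2

-- ===== PORT B =====
-- 'l = j-1; while l >= 0 and heights[l] > h: l -= 1'
def pvWalkL (hs : List Int) (h : Int) : Nat → Int
  | 0 => -1
  | l+1 => if hs.getD l 0 > h then pvWalkL hs h l else (l : Int)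

-- 'r = j+1; while r < m and heights[r] >= h: r += 1'  (fuel = m - r encodes 'r < m')
def pvWalkR (hs : List Int) (h : Int) : Nat → Nat → Nat
  | 0, r => r
  | fuel+1, r => if hs.getD r 0 ≥ h then pvWalkR hs h fuel (r+1) else r

def max_positive_rectangle_alt (grid : List (List Int)) : Int :=
  let m := (grid.getD 0 []).length
  (grid.foldl (fun (st : List Int × Int) row =>
      let heights := (List.range m).map (fun j => if row.getD j 0 > 0 then st.1.getD j 0 + 1 else 0)
      let best := (List.range m).foldl (fun best j =>
          let h := heights.getD j 0
          let l := pvWalkL heights h j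
          let r := pvWalkR heights h (m - (j+1)) (j+1)
          let area := h * ((r : Int) - l - 1)
          if area > best then area else best) st.2
      (heights, best))
    (List.replicate m 0, 0)).2

-- ===== PRECONDITION & SPEC =====
-- Pre_ excludes exactly the inputs where the Python A raises IndexError:
-- the empty grid (len(grid[0])), and grids whose later rows are shorter than the first row.
def Pre_max_positive_rectangle (grid : List (List Int)) : Prop :=
  grid ≠ [] ∧ ∀ row ∈ grid, (grid.getD 0 []).length ≤ row.length
instance (grid : List (List Int)) : Decidable (Pre_max_positive_rectangle grid) := by
  unfold Pre_max_positive_rectangle; infer_instance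
def pvWitness_max_positive_rectangle : List (List Int) := [[1, -2], [3, 4]]

def Spec_max_positive_rectangle (grid : List (List Int)) (out : Int) : Prop := out = max_positive_rectangle_alt grid
instance (grid : List (List Int)) (out : Int) : Decidable (Spec_max_positive_rectangle grid out) := by unfold Spec_max_positive_rectangle; infer_instance

-- ===== CLAIM (what is proved, stated in full; the proofs are below) =====
def Claim_equal_max_positive_rectangle : Prop := ∀ (grid : List (List Int)), Dom_max_positive_rectangle grid → Pre_max_positive_rectangle grid → Spec_max_positive_rectangle grid (max_positive_rectangle grid)

-- ===== LEMMAS AND PROOFS =====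

-- g-view of the histogram with the appended sentinel
def pvG (hs : List Int) (k : Nat) : Int := (hs ++ [0]).getD k 0

-- the area B computes for column j of histogram hs
def pvAreaB (hs : List Int) (j : Nat) : Int :=
  pvG hs j * ((pvWalkR hs (pvG hs j) (hs.length - (j+1)) (j+1) : Int) - pvWalkL hs (pvG hs j) j - 1)

-- adjacency relation of consecutive stack entries (p just above q)
def pvAdj (hs : List Int) (p q : Nat) : Prop :=
  q < p ∧ pvG hs q ≤ pvG hs p ∧ ∀ t, q < t → t < p → pvG hs t > pvG hs p

-- accumulated maximum: fold of B-areas over the already-popped indices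
def pvFoldSet (hs : List Int) (i : Nat) (st : List Nat) : Int :=
  Finset.fold max 0 (pvAreaB hs) ((Finset.range i).filter (fun p => p ∉ st))

-- loop invariant of A's outer loop, before processing index i
def pvInv (hs : List Int) (i : Nat) (st : List Nat) : Prop :=
  List.IsChain (pvAdj hs) st ∧
  (∀ p ∈ st, p < i ∧ ∀ t, p < t → t < i → pvG hs t ≥ pvG hs p) ∧
  (∀ b, st.getLast? = some b → ∀ t, t < b → pvG hs t > pvG hs b) ∧
  (∀ t, t < i → t ∉ st → ∃ τ, t < τ ∧ τ < i ∧ pvG hs τ < pvG hs t) ∧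
  (∀ t, t < i → pvG hs t = 0 → t ∈ st)

lemma pvG_lt (hs : List Int) (k : Nat) (h : k < hs.length) : pvG hs k = hs.getD k 0 := by
  simp [pvG, h, List.getD_eq_getElem?_getD, List.getElem?_append_left h]

lemma pvG_len (hs : List Int) : pvG hs hs.length = 0 := by
  simp [pvG, List.getD_eq_getElem?_getD]

lemma pvG_nonneg (hs : List Int) (hnn : ∀ x ∈ hs, 0 ≤ x) (k : Nat) : 0 ≤ pvG hs k := by
  unfold pvG
  rcases Nat.lt_or_ge k (hs ++ [0]).length with h | h
  · have := List.getD_eq_getElem (hs ++ [0]) 0 h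
    rw [this]
    have hm : (hs ++ [0])[k] ∈ hs ++ [0] := List.getElem_mem h
    rcases List.mem_append.mp hm with h1 | h1
    · exact hnn _ h1
    · simp at h1; omega
  · rw [List.getD_eq_default _ _ h]

lemma pvWalkL_stop (hs : List Int) (h : Int) (q : Nat) :
    ∀ j, q < j → hs.getD q 0 ≤ h → (∀ t, q < t → t < j → hs.getD t 0 > h) →
    pvWalkL hs h j = (q : Int) := by
  intro j
  induction j with
  | zero => omega
  | succ l ih =>
    intro hqj hle hbt
    by_cases hql : q = l
    · subst hql
      simp only [pvWalkL]
      rw [if_neg (not_lt.mpr hle)]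
    · have hql' : q < l := by omega
      have : hs.getD l 0 > h := hbt l hql' (by omega)
      simp only [pvWalkL, if_pos this]
      exact ih hql' hle (fun t ht1 ht2 => hbt t ht1 (by omega))

lemma pvWalkL_none (hs : List Int) (h : Int) :
    ∀ j, (∀ t, t < j → hs.getD t 0 > h) → pvWalkL hs h j = -1 := by
  intro j
  induction j with
  | zero => simp [pvWalkL]
  | succ l ih =>
    intro hbt
    simp only [pvWalkL, if_pos (hbt l (by omega))]
    exact ih (fun t ht => hbt t (by omega))

lemma pvWalkR_stop (hs : List Int) (h : Int) (e : Nat) (hem : e ≤ hs.length) :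
    ∀ fuel j, fuel = hs.length - j → j ≤ e →
    (∀ t, j ≤ t → t < e → hs.getD t 0 ≥ h) → (e = hs.length ∨ hs.getD e 0 < h) →
    pvWalkR hs h fuel j = e := by
  intro fuel
  induction fuel with
  | zero =>
    intro j hf hje _ _
    have : hs.length ≤ j := by omega
    simp [pvWalkR]; omega
  | succ f ih =>
    intro j hf hje hge hstop
    have hjm : j < hs.length := by omega
    by_cases hje' : j = e
    · subst hje'
      rcases hstop with h1 | h1
      · omega
      · simp only [pvWalkR]
        rw [if_neg (not_le.mpr h1)]
    · have hjlt : j < e := by omega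
      have : hs.getD j 0 ≥ h := hge j le_rfl hjlt
      simp only [pvWalkR, if_pos this]
      exact ih (j+1) (by omega) (by omega) (fun t ht1 ht2 => hge t (by omega) ht2) hstop

lemma pvAreaB_zero (hs : List Int) (j : Nat) (h : pvG hs j = 0) : pvAreaB hs j = 0 := by
  simp [pvAreaB, h]

lemma pvFold_nonneg (f : Nat → Int) (s : Finset Nat) : 0 ≤ Finset.fold max 0 f s := by
  induction s using Finset.induction_on with
  | empty => simp
  | insert a s ha ih => rw [Finset.fold_insert ha]; exact le_trans ih (le_max_right _ _)

-- fold over a set equals fold over its filtered part when f vanishes off the part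
lemma pvFold_filter (f : Nat → Int) (P : Nat → Prop) [DecidablePred P] (s : Finset Nat)
    (hz : ∀ p ∈ s, ¬ P p → f p = 0) :
    Finset.fold max 0 f s = Finset.fold max 0 f (s.filter P) := by
  induction s using Finset.induction_on with
  | empty => simp
  | insert a s ha ih =>
    have ih' := ih (fun p hp hnp => hz p (Finset.mem_insert_of_mem hp) hnp)
    rw [Finset.fold_insert ha, Finset.filter_insert]
    by_cases hP : P a
    · rw [if_pos hP, Finset.fold_insert (by simp [ha])]
      rw [ih']
    · rw [if_neg hP, hz a (Finset.mem_insert_self a s) hP, ih']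
      have := pvFold_nonneg f (s.filter P)
      omega

lemma pvFold_base (f : Nat → Int) (s : Finset Nat) (b : Int) (hb : 0 ≤ b) :
    Finset.fold max b f s = max b (Finset.fold max 0 f s) := by
  induction s using Finset.induction_on with
  | empty => simp; omega
  | insert a s ha ih =>
    rw [Finset.fold_insert ha, Finset.fold_insert ha, ih]
    rw [max_left_comm]

-- every entry below the top is a strictly smaller index
lemma pvChain_lt (hs : List Int) (q : Nat) (st : List Nat)
    (hc : List.IsChain (pvAdj hs) (q :: st)) : ∀ p ∈ st, p < q := by
  induction st generalizing q with
  | nil => simp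
  | cons r st ih =>
    intro p hp
    rcases List.isChain_cons_cons.mp hc with ⟨hadj, hc'⟩
    rcases List.mem_cons.mp hp with rfl | hp
    · exact hadj.1
    · exact lt_trans (ih r hc' p hp) hadj.1

lemma pvChain_head_le (hs : List Int) (q : Nat) (st : List Nat)
    (hc : List.IsChain (pvAdj hs) (q :: st)) :
    ∀ p ∈ q :: st, pvG hs p ≤ pvG hs q := by
  induction st generalizing q with
  | nil => intro p hp; simp at hp; subst hp; exact le_rfl
  | cons r st ih =>
    intro p hp
    rcases List.isChain_cons_cons.mp hc with ⟨hadj, hc'⟩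
    rcases List.mem_cons.mp hp with rfl | hp
    · exact le_rfl
    · exact le_trans (ih r hc' p hp) hadj.2.1

-- descent principle: everything in the gap is taller than the current bar
lemma pvGapGt (hs : List Int) (i : Nat) (P : Nat → Prop)
    (hP : ∀ t, P t → t < i ∧ (pvG hs t > pvG hs i ∨ ∃ τ, t < τ ∧ τ < i ∧ pvG hs τ < pvG hs t ∧ P τ)) :
    ∀ t, P t → pvG hs t > pvG hs i := by
  have key : ∀ d t, P t → i - t ≤ d → pvG hs t > pvG hs i := by
    intro d
    induction d with
    | zero => intro t ht hd; have := (hP t ht).1; omega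
    | succ d ih =>
      intro t ht hd
      rcases hP t ht with ⟨hti, hcase | ⟨τ, hτ1, hτ2, hτ3, hτ4⟩⟩
      · exact hcase
      · have := ih τ hτ4 (by omega)
        omega
  intro t ht
  exact key (i - t) t ht le_rfl


lemma pvG_def (hs : List Int) (k : Nat) : (hs ++ [0]).getD k 0 = pvG hs k := rfl

lemma pvPopLemma (hs : List Int) (i : Nat) (him : i ≤ hs.length) :
    ∀ (st : List Nat) (ma : Int),
    List.IsChain (pvAdj hs) st →
    (∀ p ∈ st, p < i ∧ ∀ t, p < t → t < i → pvG hs t ≥ pvG hs p) →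
    (∀ b, st.getLast? = some b → ∀ t, t < b → pvG hs t > pvG hs b) →
    ma = pvFoldSet hs i st →
    ∃ dropped st',
      pvPopLoop (hs ++ [0]) i (pvG hs i) st ma = (st', pvFoldSet hs i st') ∧
      st = dropped ++ st' ∧
      (∀ p ∈ dropped, pvG hs p > pvG hs i) ∧
      (st' = [] ∨ ∃ q rest', st' = q :: rest' ∧ pvG hs q ≤ pvG hs i) := by
  intro st
  induction st with
  | nil =>
    intro ma _ _ _ hma
    exact ⟨[], [], by simp [pvPopLoop, hma], rfl, by simp, Or.inl rfl⟩
  | cons p rest ih =>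
    intro ma hc hmem hbot hma
    by_cases hgt : pvG hs p > pvG hs i
    · -- pop p
      have hpi : p < i := (hmem p (by simp)).1
      have hpm : p < hs.length := by omega
      have hwr : pvWalkR hs (pvG hs p) (hs.length - (p+1)) (p+1) = i := by
        apply pvWalkR_stop hs _ i him _ (p+1) rfl (by omega)
        · intro t ht1 ht2
          have h2 := (hmem p (by simp)).2 t (by omega) ht2
          rw [← pvG_lt hs t (by omega)]
          exact h2
        · rcases Nat.eq_or_lt_of_le him with he | he
          · exact Or.inl he
          · right; rw [pvG_lt hs i he] at hgt; omega
      have hpnotin : p ∉ rest := fun hmem' => absurd (pvChain_lt hs p rest hc p hmem') (lt_irrefl p)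
      have hSins : (Finset.range i).filter (fun t => t ∉ rest) =
          insert p ((Finset.range i).filter (fun t => t ∉ p :: rest)) := by
        ext t
        simp only [Finset.mem_insert, Finset.mem_filter, Finset.mem_range, List.mem_cons]
        by_cases htp : t = p
        · subst htp; tauto
        · tauto
      have hrest_chain : List.IsChain (pvAdj hs) rest := by
        have h3 : List.IsChain (pvAdj hs) ([p] ++ rest) := hc
        exact h3.right_of_append
      have hrest_mem : ∀ r ∈ rest, r < i ∧ ∀ t, r < t → t < i → pvG hs t ≥ pvG hs r :=
        fun r hr => hmem r (by simp [hr])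
      have hrest_bot : ∀ b, rest.getLast? = some b → ∀ t, t < b → pvG hs t > pvG hs b := by
        intro b hb
        apply hbot b
        cases rest with
        | nil => simp at hb
        | cons r rest2 =>
          rw [show p :: r :: rest2 = [p] ++ (r :: rest2) from rfl,
            List.getLast?_append_of_ne_nil [p] (by simp)]
          exact hb
      cases rest with
      | nil =>
        have hwl : pvWalkL hs (pvG hs p) p = -1 := by
          apply pvWalkL_none
          intro t ht
          have h2 := hbot p (by simp) t ht
          rw [← pvG_lt hs t (by omega)]
          exact h2
        have hwidth : pvAreaB hs p = pvG hs p * (i : Int) := by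
          unfold pvAreaB
          rw [hwr, hwl]
          ring
        have hfold : max ma (pvG hs p * (i : Int)) = pvFoldSet hs i [] := by
          rw [← hwidth, hma]
          unfold pvFoldSet
          rw [hSins, Finset.fold_insert (by simp)]
          rw [max_comm]
        obtain ⟨dropped, st', heq, hsplit, hdrop, hstop⟩ :=
          ih (max ma (pvG hs p * (i : Int))) hrest_chain hrest_mem hrest_bot hfold
        refine ⟨p :: dropped, st', ?_, by simp [hsplit], ?_, hstop⟩
        · rw [← heq]
          simp only [pvPopLoop, pvG_def]
          rw [if_pos hgt]
        · intro r hr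
          rcases List.mem_cons.mp hr with rfl | hr
          · exact hgt
          · exact hdrop r hr
      | cons q rest2 =>
        have hadj := (List.isChain_cons_cons.mp hc).1
        have hqp : q < p := hadj.1
        have hwl : pvWalkL hs (pvG hs p) p = (q : Int) := by
          apply pvWalkL_stop hs _ q p hqp
          · rw [← pvG_lt hs q (by omega)]
            exact hadj.2.1
          · intro t ht1 ht2
            rw [← pvG_lt hs t (by omega)]
            exact hadj.2.2 t ht1 ht2
        have hwidth : pvAreaB hs p = pvG hs p * ((i : Int) - (q : Int) - 1) := by
          unfold pvAreaB
          rw [hwr, hwl]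
        have hfold : max ma (pvG hs p * ((i : Int) - (q : Int) - 1)) = pvFoldSet hs i (q :: rest2) := by
          rw [← hwidth, hma]
          unfold pvFoldSet
          rw [hSins, Finset.fold_insert (by simp)]
          rw [max_comm]
        obtain ⟨dropped, st', heq, hsplit, hdrop, hstop⟩ :=
          ih (max ma (pvG hs p * ((i : Int) - (q : Int) - 1))) hrest_chain hrest_mem hrest_bot hfold
        refine ⟨p :: dropped, st', ?_, by simp [hsplit], ?_, hstop⟩
        · rw [← heq]
          simp only [pvPopLoop, pvG_def]
          rw [if_pos hgt]
        · intro r hr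
          rcases List.mem_cons.mp hr with rfl | hr
          · exact hgt
          · exact hdrop r hr
    · -- stop: top is not taller than the current bar
      refine ⟨[], p :: rest, ?_, rfl, by simp, Or.inr ⟨p, rest, rfl, not_lt.mp hgt⟩⟩
      simp only [pvPopLoop, pvG_def]
      rw [if_neg hgt, hma]


lemma pvFoldSet_push (hs : List Int) (i : Nat) (st : List Nat) :
    pvFoldSet hs (i+1) (i :: st) = pvFoldSet hs i st := by
  unfold pvFoldSet
  congr 1
  ext t
  simp only [Finset.mem_filter, Finset.mem_range, List.mem_cons]
  constructor
  · rintro ⟨h1, h2⟩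
    exact ⟨by omega, fun h => h2 (Or.inr h)⟩
  · rintro ⟨h1, h2⟩
    exact ⟨by omega, fun h => by rcases h with rfl | h; omega; exact h2 h⟩

lemma pvStep (hs : List Int) (hnn : ∀ x ∈ hs, 0 ≤ x) (i : Nat) (him : i ≤ hs.length)
    (st : List Nat) (ma : Int) (hinv : pvInv hs i st) (hma : ma = pvFoldSet hs i st) :
    pvInv hs (i+1) (i :: (pvPopLoop (hs ++ [0]) i (pvG hs i) st ma).1) ∧
    (pvPopLoop (hs ++ [0]) i (pvG hs i) st ma).2 =
      pvFoldSet hs (i+1) (i :: (pvPopLoop (hs ++ [0]) i (pvG hs i) st ma).1) := by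
  obtain ⟨hc, hmem, hbot, hwit, hzero⟩ := hinv
  obtain ⟨dropped, st', heq, hsplit, hdrop, hstop⟩ := pvPopLemma hs i him st ma hc hmem hbot hma
  rw [heq]
  have hst'mem : ∀ p ∈ st', p ∈ st := fun p hp => by rw [hsplit]; simp [hp]
  have hst'chain : List.IsChain (pvAdj hs) st' := by
    rw [hsplit] at hc
    exact hc.right_of_append
  -- descent: anything below i that cannot sit on the remaining stack is taller than bar i
  have hgap : ∀ t, t < i → (∀ τ, t ≤ τ → τ < i → τ ∉ st') → pvG hs t > pvG hs i := by
    have key := pvGapGt hs i (fun t => t < i ∧ ∀ τ, t ≤ τ → τ < i → τ ∉ st') ?_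
    · intro t h1 h2
      exact key t ⟨h1, h2⟩
    · rintro t ⟨ht1, ht2⟩
      refine ⟨ht1, ?_⟩
      have htnot : t ∉ st' := ht2 t le_rfl ht1
      by_cases hts : t ∈ st
      · left
        rw [hsplit] at hts
        rcases List.mem_append.mp hts with h | h
        · exact hdrop t h
        · exact absurd h htnot
      · obtain ⟨τ, hτ1, hτ2, hτ3⟩ := hwit t ht1 hts
        exact Or.inr ⟨τ, hτ1, hτ2, hτ3, hτ2, fun τ' h1 h2 => ht2 τ' (by omega) h2⟩
  constructor
  · refine ⟨?_, ?_, ?_, ?_, ?_⟩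
    · -- chain
      cases hst' : st' with
      | nil => simp
      | cons q rest' =>
        subst hst'
        apply hst'chain.cons
        intro y hy
        simp only [List.head?_cons, Option.mem_def, Option.some.injEq] at hy
        subst hy
        rcases hstop with h | ⟨q', rest'', heq', hle⟩
        · simp at h
        · injection heq' with h1 h2
          subst h1
          refine ⟨(hmem q (hst'mem q (by simp))).1, hle, ?_⟩
          intro t ht1 ht2
          apply hgap t (by omega)
          intro τ hτ1 hτ2 hτmem
          have : τ ≤ q := by
            rcases List.mem_cons.mp hτmem with rfl | hm
            · omega
            · exact le_of_lt (pvChain_lt hs q rest' hst'chain τ hm)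
          omega
    · -- membership clause
      intro p hp
      rcases List.mem_cons.mp hp with rfl | hp
      · exact ⟨by omega, fun t ht1 ht2 => by omega⟩
      · have h1 := hmem p (hst'mem p hp)
        refine ⟨by omega, ?_⟩
        intro t ht1 ht2
        by_cases hti : t = i
        · subst hti
          rcases hstop with h | ⟨q, rest', heq', hle⟩
          · rw [h] at hp; simp at hp
          · rw [heq'] at hp hst'chain
            exact le_trans (pvChain_head_le hs q rest' hst'chain p hp) hle
        · exact h1.2 t ht1 (by omega)
    · -- bottom clause
      intro b hb t ht
      cases hst' : st' with
      | nil =>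
        subst hst'
        simp at hb
        subst hb
        apply hgap t ht
        intro τ _ _ h
        simp at h
      | cons q rest' =>
        subst hst'
        rw [show (i :: q :: rest') = [i] ++ (q :: rest') from rfl,
          List.getLast?_append_of_ne_nil [i] (by simp)] at hb
        apply hbot b _ t ht
        rw [hsplit, List.getLast?_append_of_ne_nil dropped (by simp)]
        exact hb
    · -- witness clause
      intro t ht htnot
      have hti : t ≠ i := fun h => htnot (by simp [h])
      have ht' : t < i := by omega
      by_cases hts : t ∈ st
      · refine ⟨i, by omega, by omega, ?_⟩
        rw [hsplit] at hts
        rcases List.mem_append.mp hts with h | h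
        · exact hdrop t h
        · exact absurd h (fun hmem' => htnot (by simp [h]))
      · obtain ⟨τ, hτ1, hτ2, hτ3⟩ := hwit t ht' hts
        exact ⟨τ, hτ1, by omega, hτ3⟩
    · -- zeros clause
      intro t ht hz
      by_cases hti : t = i
      · simp [hti]
      · have ht' : t < i := by omega
        have hts : t ∈ st := hzero t ht' hz
        rw [hsplit] at hts
        rcases List.mem_append.mp hts with h | h
        · have := hdrop t h
          have := pvG_nonneg hs hnn i
          omega
        · simp [h]
  · exact (pvFoldSet_push hs i st').symm

lemma pvLoop (hs : List Int) (hnn : ∀ x ∈ hs, 0 ≤ x) :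
    ∀ k, k ≤ hs.length →
    pvInv hs k ((List.range k).foldl
      (fun st i => ((i :: (pvPopLoop (hs ++ [0]) i ((hs ++ [0]).getD i 0) st.1 st.2).1,
        (pvPopLoop (hs ++ [0]) i ((hs ++ [0]).getD i 0) st.1 st.2).2) : List Nat × Int))
      ([], 0)).1 ∧
    ((List.range k).foldl
      (fun st i => ((i :: (pvPopLoop (hs ++ [0]) i ((hs ++ [0]).getD i 0) st.1 st.2).1,
        (pvPopLoop (hs ++ [0]) i ((hs ++ [0]).getD i 0) st.1 st.2).2) : List Nat × Int))
      ([], 0)).2 = pvFoldSet hs k ((List.range k).foldl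
      (fun st i => ((i :: (pvPopLoop (hs ++ [0]) i ((hs ++ [0]).getD i 0) st.1 st.2).1,
        (pvPopLoop (hs ++ [0]) i ((hs ++ [0]).getD i 0) st.1 st.2).2) : List Nat × Int))
      ([], 0)).1 := by
  intro k
  induction k with
  | zero =>
    intro _
    constructor
    · exact ⟨by simp, by simp, by simp, by omega, by omega⟩
    · simp [pvFoldSet]
  | succ k ih =>
    intro hk
    obtain ⟨hinv, hma⟩ := ih (by omega)
    rw [List.range_succ, List.foldl_append, List.foldl_cons, List.foldl_nil]
    have := pvStep hs hnn k (by omega) _ _ hinv hma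
    rw [pvG_def hs k]
    exact this

lemma pvLra_eq (hs : List Int) (hnn : ∀ x ∈ hs, 0 ≤ x) :
    largest_rectangle_area hs =
      Finset.fold max 0 (pvAreaB hs) ((Finset.range hs.length).filter (fun p => 0 < pvG hs p)) := by
  obtain ⟨hinv, hma⟩ := pvLoop hs hnn hs.length le_rfl
  obtain ⟨hc, hmem, hbot, hwit, hzero⟩ := hinv
  obtain ⟨dropped, st', heq, hsplit, hdrop, hstop⟩ :=
    pvPopLemma hs hs.length le_rfl _ _ hc hmem hbot hma
  have hst'zero : ∀ p ∈ st', pvG hs p = 0 := by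
    intro p hp
    rcases hstop with h | ⟨q, rest', heq', hle⟩
    · rw [h] at hp; simp at hp
    · rw [heq'] at hp
      have hchain : List.IsChain (pvAdj hs) (q :: rest') := by
        rw [hsplit, heq'] at hc
        exact hc.right_of_append
      have h1 := pvChain_head_le hs q rest' hchain p hp
      rw [pvG_len] at hle
      have h2 := pvG_nonneg hs hnn p
      omega
  have hlen : (hs ++ [0]).length = hs.length + 1 := by simp
  show ((List.range (hs ++ [0]).length).foldl
      (fun st i => ((i :: (pvPopLoop (hs ++ [0]) i ((hs ++ [0]).getD i 0) st.1 st.2).1,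
        (pvPopLoop (hs ++ [0]) i ((hs ++ [0]).getD i 0) st.1 st.2).2) : List Nat × Int))
      ([], 0)).2 = _
  rw [hlen, List.range_succ, List.foldl_append, List.foldl_cons, List.foldl_nil]
  rw [pvG_def hs hs.length]
  simp only [heq]
  unfold pvFoldSet
  congr 1
  ext p
  simp only [Finset.mem_filter, Finset.mem_range]
  constructor
  · rintro ⟨h1, h2⟩
    refine ⟨h1, ?_⟩
    by_contra hle
    have hz : pvG hs p = 0 := le_antisymm (by omega) (pvG_nonneg hs hnn p)
    have := hzero p h1 hz
    rw [hsplit] at this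
    rcases List.mem_append.mp this with h | h
    · have := hdrop p h
      rw [pvG_len] at this
      omega
    · exact h2 h
  · rintro ⟨h1, h2⟩
    refine ⟨h1, ?_⟩
    intro hp
    have := hst'zero p hp
    omega

lemma pvIf_max (a b : Int) : (if a > b then a else b) = max b a := by
  simp only [max_def]
  split_ifs <;> omega

lemma pvFoldlMax (k : Nat) (b : Int) (f : Nat → Int) :
    (List.range k).foldl (fun best j => max best (f j)) b = Finset.fold max b f (Finset.range k) := by
  induction k with
  | zero => simp
  | succ k ih =>
    rw [List.range_succ, List.foldl_append, List.foldl_cons, List.foldl_nil,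
      Finset.range_add_one, Finset.fold_insert (by simp), ih, max_comm]

lemma pvGetD_nonneg (l : List Int) (hnn : ∀ x ∈ l, 0 ≤ x) (j : Nat) : 0 ≤ l.getD j 0 := by
  rcases Nat.lt_or_ge j l.length with h | h
  · rw [List.getD_eq_getElem l 0 h]
    exact hnn _ (List.getElem_mem h)
  · rw [List.getD_eq_default l 0 h]

-- B's row pass computes max(acc, largest_rectangle_area hs)
lemma pvRowB (hs : List Int) (hnn : ∀ x ∈ hs, 0 ≤ x) (b : Int) (hb : 0 ≤ b) :
    (List.range hs.length).foldl (fun best j =>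
      if hs.getD j 0 * ((pvWalkR hs (hs.getD j 0) (hs.length - (j+1)) (j+1) : Int)
          - pvWalkL hs (hs.getD j 0) j - 1) > best
      then hs.getD j 0 * ((pvWalkR hs (hs.getD j 0) (hs.length - (j+1)) (j+1) : Int)
          - pvWalkL hs (hs.getD j 0) j - 1)
      else best) b
    = max b (largest_rectangle_area hs) := by
  have hcongr : (List.range hs.length).foldl (fun best j =>
      if hs.getD j 0 * ((pvWalkR hs (hs.getD j 0) (hs.length - (j+1)) (j+1) : Int)
          - pvWalkL hs (hs.getD j 0) j - 1) > best
      then hs.getD j 0 * ((pvWalkR hs (hs.getD j 0) (hs.length - (j+1)) (j+1) : Int)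
          - pvWalkL hs (hs.getD j 0) j - 1)
      else best) b
      = (List.range hs.length).foldl (fun best j => max best (pvAreaB hs j)) b := by
    apply PySem.List.foldl_congr_mem
    intro acc j hj
    have hjlen : j < hs.length := List.mem_range.mp hj
    rw [pvIf_max]
    unfold pvAreaB
    rw [pvG_lt hs j hjlen]
  rw [hcongr, pvFoldlMax, pvFold_base _ _ b hb, pvLra_eq hs hnn]
  congr 1
  apply pvFold_filter
  intro p hp hnpos
  have h1 := pvG_nonneg hs hnn p
  exact pvAreaB_zero hs p (by omega)

-- the two grid folds agree on the accumulated maximum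
lemma pvGrid (m : Nat) :
    ∀ (rows : List (List Int)) (hs : List Int) (acc : Int),
    hs.length = m → (∀ x ∈ hs, 0 ≤ x) → 0 ≤ acc →
    (rows.foldl (fun (st : List Int × Int) row =>
      let heights := (List.range m).map (fun j => if row.getD j 0 > 0 then st.1.getD j 0 + 1 else 0)
      (heights, max st.2 (largest_rectangle_area heights))) (hs, acc)).2 =
    (rows.foldl (fun (st : List Int × Int) row =>
      let heights := (List.range m).map (fun j => if row.getD j 0 > 0 then st.1.getD j 0 + 1 else 0)
      let best := (List.range m).foldl (fun best j =>
          let h := heights.getD j 0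
          let l := pvWalkL heights h j
          let r := pvWalkR heights h (m - (j+1)) (j+1)
          let area := h * ((r : Int) - l - 1)
          if area > best then area else best) st.2
      (heights, best)) (hs, acc)).2 := by
  intro rows
  induction rows with
  | nil =>
    intro hs acc _ _ _
    rfl
  | cons row rows ih =>
    intro hs acc hlen hnn hacc
    simp only [List.foldl_cons]
    have hlen' : ((List.range m).map
        (fun j => if row.getD j 0 > 0 then hs.getD j 0 + 1 else 0)).length = m := by
      simp
    have hnn' : ∀ x ∈ (List.range m).map
        (fun j => if row.getD j 0 > 0 then hs.getD j 0 + 1 else 0), 0 ≤ x := by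
      intro x hx
      rcases List.mem_map.mp hx with ⟨j, _, hx⟩
      have := pvGetD_nonneg hs hnn j
      split_ifs at hx <;> omega
    have hrow := pvRowB ((List.range m).map
        (fun j => if row.getD j 0 > 0 then hs.getD j 0 + 1 else 0)) hnn' acc hacc
    rw [hlen'] at hrow
    rw [hrow]
    exact ih _ _ hlen' hnn' (le_trans hacc (le_max_left _ _))

-- ===== VERDICT (by name: the statement is the Claim_ definition above) =====
theorem max_positive_rectangle_spec : Claim_equal_max_positive_rectangle := by
  intro grid _ _
  unfold Spec_max_positive_rectangle max_positive_rectangle max_positive_rectangle_alt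
  exact pvGrid ((grid.getD 0 []).length) grid (List.replicate _ 0) 0 (by simp)
    (fun x hx => by simp [List.eq_of_mem_replicate hx]) le_rfl
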